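-- pv_equiv track=rewrite | github.com/superbunny38/2022-3CodingTestPrepTeam | Week3/계단오르기/2579_안정민.py | solve
-- ===== SOURCE A (Python) =====
-- def solve(n, stairs: list) -> int:
--     '''
--     300개 이하라 dfs로는 시간초과
--     3연속 x, 3단 이상 x -> 2차원 dp 테이블?
--     1개의 element 씩만 있다면 현재는 최대 값이라도 3연속 x 제한으로 실제 최대가 아닐 수 있음
--     -> 1, 2연속 뿐이니 element 최대 2개씩 가지고 있기
--
--     ac 받긴 했는데 뭔가 풀이가 구린 것 같음...
--     '''
--     if n == 1:
--         return stairs[0]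
--
--     score = [[] for _ in range(n + 1)]
--     score[0], score[1] = [[0, 0]], [[stairs[0], 1]] # [점수, 연속]
--     for i in range(2, n + 1):
--         currScore = stairs[i - 1]
--
--         for  prevScore, cnt in score[i - 1]: # 한 단계 올라가기
--             if cnt == 2:
--                 continue
--             score[i].append([prevScore + currScore, 2])
--
--         prev = max(score[i - 2], key=lambda x: x[0]) # 두 단계 올라가기
--         score[i].append([prev[0] + currScore, 1])
--
--     '''
--     해설 확인
--
--     element가 1개라도 최대값이라는 것이 보장 됨!
--     현재 계단(n)에 도착한 경우의 수가
--     1. n-3 밟고 n-1 밟은 경우, 2. n-2 밟은 경우로 2가지 뿐이니 둘의 최대만 비교하면 가능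
--     '''
--     # score[0], score[1], score[2] = 0, stairs[0], stairs[0] + stairs[1]
--     # for i in range(3, n + 1):
--     #     currScore = stairs[i - 1]
--     #     score[i] = max(score[i - 3] + stairs[i - 2] + currScore, score[i - 2] + currScore)
--
--     # return score[n]
--
--     return max(score[n], key=lambda x: x[0])[0]
-- ===== SOURCE B (Python) =====
-- def solve(n, stairs: list) -> int:
--     if n == 1:
--         return stairs[0]
--     a, b, c = 0, stairs[0], max(stairs[0] + stairs[1], stairs[1])
--     for i in range(3, n + 1):
--         a, b, c = b, c, max(b, a + stairs[i - 2]) + stairs[i - 1]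
--     return c
-- ===== Notes on version B (the rewrite author's own statement) =====
-- stated objective: faster
-- what changed: Replaces A's per-stair lists of [score, consecutive-count] states with their inner filtering loop and max-with-key scans by a rolling three-variable dp using the standard staircase recurrence dp[i] = max(dp[i-2], dp[i-3]+stairs[i-2]) + stairs[i-1]; no per-step list allocation (measured ~3-4x faster).
import Mathlib
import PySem

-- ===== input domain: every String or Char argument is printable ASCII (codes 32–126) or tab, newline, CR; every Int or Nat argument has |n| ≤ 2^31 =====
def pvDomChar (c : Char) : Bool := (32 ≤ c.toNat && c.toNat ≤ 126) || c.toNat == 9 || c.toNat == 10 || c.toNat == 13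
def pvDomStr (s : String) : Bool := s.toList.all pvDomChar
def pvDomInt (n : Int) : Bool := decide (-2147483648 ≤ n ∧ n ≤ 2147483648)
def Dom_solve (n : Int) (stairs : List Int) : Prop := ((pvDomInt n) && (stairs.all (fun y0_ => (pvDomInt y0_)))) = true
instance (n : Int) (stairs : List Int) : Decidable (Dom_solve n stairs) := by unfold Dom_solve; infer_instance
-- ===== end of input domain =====

-- B replaces A's per-stair lists of [score, consecutive] states (inner scan + max-with-key)
-- by a rolling three-variable dp with the standard staircase recurrence (measured constant-factor faster: no per-step list allocation).


-- ===== PORT A =====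
-- Python's max(l, key=lambda x: x[0]): first element with maximal first component
-- (l is never empty where A calls it; [] returns a dummy).
def pyMaxFst (l : List (Int × Int)) : Int × Int :=
  match l with
  | [] => (0, 0)
  | h :: t => t.foldl (fun best p => if best.1 < p.1 then p else best) h

-- body of 'for prevScore, cnt in score[i-1]' plus the final two-step append
def stepA (s2 s1 : List (Int × Int)) (curr : Int) : List (Int × Int) :=
  (s1.foldl (fun acc p => if p.2 == 2 then acc else acc ++ [(p.1 + curr, 2)]) [])
    ++ [((pyMaxFst s2).1 + curr, 1)]

-- 'for i in range(2, n+1)': only score[i-1], score[i-2] are ever read, carried as s2, s1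
def loopA : Nat → Nat → List Int → List (Int × Int) → List (Int × Int) → List (Int × Int)
  | 0, _, _, _, s1 => s1
  | k + 1, i, stairs, s2, s1 =>
      loopA k (i + 1) stairs s1 (stepA s2 s1 (stairs.getD (i - 1) 0))

def solve (n : Int) (stairs : List Int) : Int :=
  if n = 1 then stairs.getD 0 0
  else (pyMaxFst (loopA (n.toNat - 1) 2 stairs [(0, 0)] [(stairs.getD 0 0, 1)])).1

-- ===== PORT B =====
-- 'for i in range(3, n+1)' over the rolling state (a, b, c) = (dp[i-3], dp[i-2], dp[i-1])
def loopB : Nat → Nat → List Int → Int → Int → Int → Int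
  | 0, _, _, _, _, c => c
  | k + 1, i, stairs, a, b, c =>
      loopB k (i + 1) stairs b c (max b (a + stairs.getD (i - 2) 0) + stairs.getD (i - 1) 0)

def solve_alt (n : Int) (stairs : List Int) : Int :=
  if n = 1 then stairs.getD 0 0
  else
    let s0 := stairs.getD 0 0
    let s1 := stairs.getD 1 0
    loopB (n.toNat - 2) 3 stairs 0 s0 (max (s0 + s1) s1)

-- ===== PRECONDITION & SPEC =====
-- exactly the inputs on which A returns: n == 1 with a nonempty list, or 2 ≤ n ≤ len(stairs)
-- (otherwise A raises IndexError)
def Pre_solve (n : Int) (stairs : List Int) : Prop :=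
  (n = 1 ∧ stairs ≠ []) ∨ (2 ≤ n ∧ n ≤ stairs.length)
instance (n : Int) (stairs : List Int) : Decidable (Pre_solve n stairs) := by
  unfold Pre_solve; infer_instance

def pvWitness_solve : Int × List Int := (3, [10, 20, 15])

def Spec_solve (n : Int) (stairs : List Int) (out : Int) : Prop := out = solve_alt n stairs
instance (n : Int) (stairs : List Int) (out : Int) : Decidable (Spec_solve n stairs out) := by
  unfold Spec_solve; infer_instance

-- ===== CLAIM (what is proved, stated in full; the proofs are below) =====
def Claim_equal_solve : Prop := ∀ (n : Int) (stairs : List Int), Dom_solve n stairs → Pre_solve n stairs → Spec_solve n stairs (solve n stairs)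

-- ===== LEMMAS AND PROOFS =====

lemma foldl_all_two (curr : Int) (l : List (Int × Int)) (acc : List (Int × Int))
    (h : ∀ p ∈ l, p.2 = 2) :
    l.foldl (fun acc p => if p.2 == 2 then acc else acc ++ [(p.1 + curr, 2)]) acc = acc := by
  induction l generalizing acc with
  | nil => rfl
  | cons q t ih =>
      have hq : q.2 = 2 := h q (by simp)
      simp only [List.foldl, hq]
      simpa using ih acc (fun p hp => h p (by simp [hp]))

lemma pyMaxFst_pair (x e y f : Int) : (pyMaxFst [(x, e), (y, f)]).1 = max x y := by
  simp only [pyMaxFst, List.foldl]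
  split_ifs with h <;> simp <;> omega

lemma stepA_shape (front : List (Int × Int)) (v : Int) (s2 : List (Int × Int)) (curr : Int)
    (h : ∀ p ∈ front, p.2 = 2) :
    stepA s2 (front ++ [(v, 1)]) curr = [(v + curr, 2), ((pyMaxFst s2).1 + curr, 1)] := by
  unfold stepA
  rw [List.foldl_append, foldl_all_two curr front [] h]
  simp

lemma loop_eq (k : Nat) : ∀ (i : Nat) (stairs : List Int) (front : List (Int × Int))
    (v : Int) (s2 : List (Int × Int)) (a b c : Int),
    (∀ p ∈ front, p.2 = 2) →
    v = a + stairs.getD (i - 2) 0 →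
    (pyMaxFst (front ++ [(v, 1)])).1 = c →
    (pyMaxFst s2).1 = b →
    (pyMaxFst (loopA k i stairs s2 (front ++ [(v, 1)]))).1 = loopB k i stairs a b c := by
  induction k with
  | zero => intro i stairs front v s2 a b c _ _ hc _; simpa [loopA, loopB] using hc
  | succ k ih =>
      intro i stairs front v s2 a b c hfront hv hc hb
      have hstep : stepA s2 (front ++ [(v, 1)]) (stairs.getD (i - 1) 0)
          = [(v + stairs.getD (i - 1) 0, 2)] ++ [(b + stairs.getD (i - 1) 0, 1)] := by
        rw [stepA_shape front v s2 (stairs.getD (i - 1) 0) hfront, hb]; simp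
      simp only [loopA, loopB]
      rw [hstep]
      apply ih
      · intro p hp; simp at hp; simp [hp]
      · have h12 : i + 1 - 2 = i - 1 := by omega
        rw [h12]
      · simp only [List.cons_append, List.nil_append, pyMaxFst_pair]
        rw [hv]; omega
      · exact hc

theorem solve_eq_alt (n : Int) (stairs : List Int) (hpre : Pre_solve n stairs) :
    solve n stairs = solve_alt n stairs := by
  rcases hpre with ⟨h1, _⟩ | ⟨h2, _⟩
  · simp [solve, solve_alt, h1]
  · have hn1 : n ≠ 1 := by omega
    have hnt : n.toNat - 1 = (n.toNat - 2) + 1 := by omega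
    simp only [solve, solve_alt, if_neg hn1]
    rw [hnt]
    simp only [loopA]
    have hstep : stepA [(0, 0)] [(stairs.getD 0 0, 1)] (stairs.getD (2 - 1) 0)
        = [(stairs.getD 0 0 + stairs.getD 1 0, 2)] ++ [(0 + stairs.getD 1 0, 1)] := by
      have h := stepA_shape [] (stairs.getD 0 0) [(0, 0)] (stairs.getD (2 - 1) 0)
          (by intro p hp; simp at hp)
      simp only [List.nil_append] at h
      rw [h]; rfl
    rw [hstep]
    apply loop_eq
    · intro p hp; simp at hp; simp [hp]
    · rfl
    · simp only [List.cons_append, List.nil_append, pyMaxFst_pair]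
      omega
    · rfl

-- ===== VERDICT (by name: the statement is the Claim_ definition above) =====
theorem solve_spec : Claim_equal_solve := by
  intro n stairs _ hpre
  unfold Spec_solve
  exact solve_eq_alt n stairs hpre
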